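-- pv_equiv track=rewrite | github.com/theayushsonkar/Vigenere-Cipher-Cryptanalysis | vigenere_final.py | reconstruct_plaintext
-- ===== SOURCE A (Python) =====
-- def reconstruct_plaintext(ciphertext, decrypted_letters):
--     """Reinsert spaces/punctuation/case into the decrypted text."""
--     result = []
--     idx = 0  # index into decrypted_letters (A–Z only)
--     for ch in ciphertext:
--         if ch.isalpha():
--             # pick next decrypted letter
--             plain_char = decrypted_letters[idx]
--             # match case
--             if ch.islower():
--                 plain_char = plain_char.lower()
--             result.append(plain_char)
--             idx += 1
--         else:
--             # leave punctuation, spaces, etc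
--             result.append(ch)
--     return "".join(result)
-- ===== SOURCE B (Python) =====
-- def reconstruct_plaintext(ciphertext, decrypted_letters):
--     """Reinsert spaces/punctuation/case into the decrypted text.
--
--     Two-pass decomposition: first compute, for every position, the rank of that
--     character among the alphabetic characters so far (a prefix count); then map
--     over (char, rank) pairs, substituting decrypted_letters[rank] for letters.
--     """
--     ranks = []
--     k = 0
--     for ch in ciphertext:
--         ranks.append(k)
--         if ch.isalpha():
--             k += 1
--     return "".join(
--         (decrypted_letters[r].lower() if ch.islower() else decrypted_letters[r])
--         if ch.isalpha() else ch
--         for ch, r in zip(ciphertext, ranks))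
-- ===== Notes on version B (the rewrite author's own statement) =====
-- stated objective: alternative
-- what changed: B replaces A's single fused loop with a running index into decrypted_letters by a two-pass decomposition: a prefix-count pass computing each position's alphabetic rank, then a zip/map pass substituting decrypted_letters[rank] with case matching.
import Mathlib
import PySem

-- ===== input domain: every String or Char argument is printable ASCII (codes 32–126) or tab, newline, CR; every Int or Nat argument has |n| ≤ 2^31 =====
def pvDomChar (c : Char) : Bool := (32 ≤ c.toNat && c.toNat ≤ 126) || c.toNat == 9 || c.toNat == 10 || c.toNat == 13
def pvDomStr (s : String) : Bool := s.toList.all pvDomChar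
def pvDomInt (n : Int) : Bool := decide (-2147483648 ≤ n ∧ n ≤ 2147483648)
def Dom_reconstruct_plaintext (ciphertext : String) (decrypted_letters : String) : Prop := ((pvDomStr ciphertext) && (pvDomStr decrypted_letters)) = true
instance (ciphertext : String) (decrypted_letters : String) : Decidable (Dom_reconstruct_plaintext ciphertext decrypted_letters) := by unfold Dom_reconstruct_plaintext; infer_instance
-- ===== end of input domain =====

-- B replaces A's fused loop (running index into decrypted_letters) by a two-pass
-- prefix-count + zip/map decomposition; alternative structure, same O(n) cost.


-- ===== PORT A =====
-- A's loop: consume the next decrypted letter at each alphabetic character,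
-- matching case; non-letters pass through. 'decrypted_letters[idx]' is in range
-- exactly under Pre_ below; out of range (Python IndexError) the port uses ' '.
def pvGoA (dl : List Char) : List Char → Nat → List Char
  | [], _ => []
  | ch :: rest, idx =>
    if PySem.Chars.isalpha ch then
      let plain0 := dl.getD idx ' '
      let plain := if PySem.Chars.islower ch then PySem.Chars.lowerChar plain0 else plain0
      plain :: pvGoA dl rest (idx + 1)
    else
      ch :: pvGoA dl rest idx

def reconstruct_plaintext (ciphertext : String) (decrypted_letters : String) : String :=
  String.mk (pvGoA decrypted_letters.toList ciphertext.toList 0)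

-- ===== PORT B =====
-- B pass 1: ranks cs k = for each position, the count of alphabetic chars before it.
def pvRanks : List Char → Nat → List Nat
  | [], _ => []
  | ch :: rest, k => k :: pvRanks rest (if PySem.Chars.isalpha ch then k + 1 else k)

def reconstruct_plaintext_alt (ciphertext : String) (decrypted_letters : String) : String :=
  let cs := ciphertext.toList
  let dl := decrypted_letters.toList
  String.mk ((cs.zip (pvRanks cs 0)).map (fun p =>
    if PySem.Chars.isalpha p.1 then
      if PySem.Chars.islower p.1 then PySem.Chars.lowerChar (dl.getD p.2 ' ') else dl.getD p.2 ' '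
    else p.1))

-- ===== PRECONDITION & SPEC =====
-- Pre_ excludes exactly the inputs where Python A raises IndexError (fewer
-- decrypted letters than alphabetic ciphertext characters); B raises there too.
def Pre_reconstruct_plaintext (ciphertext : String) (decrypted_letters : String) : Prop :=
  (ciphertext.toList.filter PySem.Chars.isalpha).length ≤ decrypted_letters.toList.length
instance (ciphertext : String) (decrypted_letters : String) : Decidable (Pre_reconstruct_plaintext ciphertext decrypted_letters) := by unfold Pre_reconstruct_plaintext; infer_instance
def pvWitness_reconstruct_plaintext : String × String := ("Hi, you!", "ABCDE")

def Spec_reconstruct_plaintext (ciphertext : String) (decrypted_letters : String) (out : String) : Prop := out = reconstruct_plaintext_alt ciphertext decrypted_letters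
instance (ciphertext : String) (decrypted_letters : String) (out : String) : Decidable (Spec_reconstruct_plaintext ciphertext decrypted_letters out) := by unfold Spec_reconstruct_plaintext; infer_instance

-- ===== CLAIM (what is proved, stated in full; the proofs are below) =====
def Claim_equal_reconstruct_plaintext : Prop := ∀ (ciphertext : String) (decrypted_letters : String), Dom_reconstruct_plaintext ciphertext decrypted_letters → Pre_reconstruct_plaintext ciphertext decrypted_letters → Spec_reconstruct_plaintext ciphertext decrypted_letters (reconstruct_plaintext ciphertext decrypted_letters)

-- ===== LEMMAS AND PROOFS =====
-- Core: A's index-threading recursion equals B's zip-with-ranks map, for any start k.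
theorem pvGoA_eq_ranks (dl : List Char) (cs : List Char) (k : Nat) :
    pvGoA dl cs k = (cs.zip (pvRanks cs k)).map (fun p =>
      if PySem.Chars.isalpha p.1 then
        if PySem.Chars.islower p.1 then PySem.Chars.lowerChar (dl.getD p.2 ' ') else dl.getD p.2 ' '
      else p.1) := by
  induction cs generalizing k with
  | nil => simp [pvGoA, pvRanks]
  | cons ch rest ih =>
    by_cases h : PySem.Chars.isalpha ch = true <;>
      simp [pvGoA, pvRanks, h, ih]

-- ===== VERDICT (by name: the statement is the Claim_ definition above) =====
theorem reconstruct_plaintext_spec : Claim_equal_reconstruct_plaintext := by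
  intro ct dl _ _
  unfold Spec_reconstruct_plaintext reconstruct_plaintext reconstruct_plaintext_alt
  rw [pvGoA_eq_ranks]
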